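-- pv_equiv track=rewrite | github.com/guys79/EA_ASS1_Python | functionDefinitionsAsArray.py | getChecks
-- ===== SOURCE A (Python) =====
-- def getChecks(row,col,ind):
--     count = 0
--     # up
--     for k in range(0,row):
--         if ind[k][col] == 1:
--             count = count + 1
--     # down
--     for k in range(row+1,len(ind)):
--         if ind[k][col] == 1:
--             count = count + 1
--     # left
--     for k in range(0,col):
--         if ind[row][k] == 1:
--             count = count + 1
--     # right
--     for k in range(col+1,len(ind[row])):
--         if ind[row][k] == 1:
--             count = count + 1
--     # up - right
--     i = row -1
--     j = col +1
--     while(i >=0 and j <len(ind[row])):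
--         if ind[i][j] == 1:
--             count = count + 1
--         i = i - 1
--         j = j + 1
--
--     # up - left
--     i = row - 1
--     j = col - 1
--     while (i >= 0 and j >=0):
--         if ind[i][j] == 1:
--             count = count + 1
--         i = i - 1
--         j = j - 1
--
--     # down - right
--     i = row + 1
--     j = col + 1
--     while (i<len(ind) and j<len(ind[row])):
--         if ind[i][j] == 1:
--             count = count + 1
--         i = i + 1
--         j = j + 1
--
--     # down - left
--     i = row + 1
--     j = col - 1
--     while (j >= 0 and i < len(ind)):
--         if ind[i][ j] == 1:
--             count = count + 1
--         i = i + 1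
--         j = j - 1
--     return count
-- ===== SOURCE B (Python) =====
-- def getChecks(row, col, ind):
--     n = len(ind)
--     m = len(ind[row])
--     # the row line: ones in the row, minus the centre cell itself
--     count = ind[row].count(1) - (1 if ind[row][col] == 1 else 0)
--     # every other row r contributes at most three cells: same column and the two diagonal hits
--     for r in range(n):
--         if r == row:
--             continue
--         d = abs(row - r)
--         for c in (col, col - d, col + d):
--             if 0 <= c < m and ind[r][c] == 1:
--                 count += 1
--     return count
-- ===== Notes on version B (the rewrite author's own statement) =====
-- stated objective: simpler
-- what changed: A walks eight separate directional passes (two column loops, two row loops, four diagonal while-walks); B counts the row line as ones-in-the-row minus the centre cell and then makes one loop over the rows in which each other row contributes at most three bounds-checked candidate cells (same column and the two diagonal offsets).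
-- outside the precondition, e.g. on getChecks(-2, 0, [[1], [1]]): A returns 3, B returns 2; on getChecks(0, 1, [[1], [1, 1]]): A returns 3, B raises IndexError
import Mathlib
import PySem

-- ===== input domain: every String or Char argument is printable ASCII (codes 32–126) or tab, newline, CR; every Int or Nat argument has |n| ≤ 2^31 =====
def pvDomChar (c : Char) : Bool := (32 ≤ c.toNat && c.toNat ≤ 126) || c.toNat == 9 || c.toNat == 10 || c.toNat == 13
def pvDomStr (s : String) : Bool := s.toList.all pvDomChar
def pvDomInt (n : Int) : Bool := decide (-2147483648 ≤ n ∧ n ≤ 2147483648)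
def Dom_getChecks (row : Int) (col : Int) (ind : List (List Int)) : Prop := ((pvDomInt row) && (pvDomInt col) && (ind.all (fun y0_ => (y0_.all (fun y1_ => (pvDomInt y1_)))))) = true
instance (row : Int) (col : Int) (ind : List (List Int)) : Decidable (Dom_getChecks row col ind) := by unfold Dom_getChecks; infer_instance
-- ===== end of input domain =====

-- B replaces A's eight directional passes by a row-line count (ones in the row minus the centre cell)
-- plus one loop over the rows, each other row contributing at most three bounds-checked candidate
-- cells (same column and the two diagonal offsets); objective: simpler (one loop instead of eight).
-- Pre_ restricts to rectangular boards with an in-range (row, col): outside it A usually raises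
-- IndexError, and where it still returns, the value rests on Python's negative-index wraparound or on
-- which cells the eight partial walks happen to reach on a jagged board — accidental behaviour B does
-- not reproduce.


-- cell value ind[i][j] (Python indexing; defaults never reached inside Pre_, where A does not raise)
def pvCell (ind : List (List Int)) (i j : Int) : Int :=
  PySem.List.pyGetD (PySem.List.pyGetD ind i []) j 0

-- ===== PORT A =====
-- the four while-walks of A, one def each (termination: the moving index walks towards its bound)
def pvWalkUR (ind : List (List Int)) (m : Int) (i j cnt : Int) : Int :=
  if h : 0 ≤ i ∧ j < m then
    pvWalkUR ind m (i - 1) (j + 1) (if pvCell ind i j = 1 then cnt + 1 else cnt)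
  else cnt
termination_by (i + 1).toNat
decreasing_by omega

def pvWalkUL (ind : List (List Int)) (i j cnt : Int) : Int :=
  if h : 0 ≤ i ∧ 0 ≤ j then
    pvWalkUL ind (i - 1) (j - 1) (if pvCell ind i j = 1 then cnt + 1 else cnt)
  else cnt
termination_by (i + 1).toNat
decreasing_by omega

def pvWalkDR (ind : List (List Int)) (n m : Int) (i j cnt : Int) : Int :=
  if h : i < n ∧ j < m then
    pvWalkDR ind n m (i + 1) (j + 1) (if pvCell ind i j = 1 then cnt + 1 else cnt)
  else cnt
termination_by (n - i).toNat
decreasing_by omega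

def pvWalkDL (ind : List (List Int)) (n : Int) (i j cnt : Int) : Int :=
  if h : 0 ≤ j ∧ i < n then
    pvWalkDL ind n (i + 1) (j - 1) (if pvCell ind i j = 1 then cnt + 1 else cnt)
  else cnt
termination_by (j + 1).toNat
decreasing_by omega

def getChecks (row : Int) (col : Int) (ind : List (List Int)) : Int :=
  let n : Int := ind.length
  let m : Int := (PySem.List.pyGetD ind row []).length
  let c1 := (PySem.List.pyRange 0 row 1).foldl
    (fun cnt k => if pvCell ind k col = 1 then cnt + 1 else cnt) 0
  let c2 := (PySem.List.pyRange (row + 1) n 1).foldl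
    (fun cnt k => if pvCell ind k col = 1 then cnt + 1 else cnt) c1
  let c3 := (PySem.List.pyRange 0 col 1).foldl
    (fun cnt k => if pvCell ind row k = 1 then cnt + 1 else cnt) c2
  let c4 := (PySem.List.pyRange (col + 1) m 1).foldl
    (fun cnt k => if pvCell ind row k = 1 then cnt + 1 else cnt) c3
  let c5 := pvWalkUR ind m (row - 1) (col + 1) c4
  let c6 := pvWalkUL ind (row - 1) (col - 1) c5
  let c7 := pvWalkDR ind n m (row + 1) (col + 1) c6
  pvWalkDL ind n (row + 1) (col - 1) c7

-- ===== PORT B =====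
def getChecks_alt (row : Int) (col : Int) (ind : List (List Int)) : Int :=
  let n : Int := ind.length
  let m : Int := (PySem.List.pyGetD ind row []).length
  let count : Int := (PySem.List.count (PySem.List.pyGetD ind row []) 1 : Int)
    - (if pvCell ind row col = 1 then 1 else 0)
  (PySem.List.pyRange 0 n 1).foldl
    (fun cnt r =>
      if r = row then cnt
      else
        let d := |row - r|
        [col, col - d, col + d].foldl
          (fun cnt c => if 0 ≤ c ∧ c < m ∧ pvCell ind r c = 1 then cnt + 1 else cnt) cnt)
    count

-- ===== PRECONDITION & SPEC =====
-- Pre_ admits the in-range (row, col) boards on which every cell the eight walks touch exists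
-- (so A returns normally); it excludes inputs on which A still returns via Python's negative-index
-- wraparound (negative row/col) or, with col out of ind[row]'s range, via whichever cells its
-- partial walks happen to reach — accidental behaviour B does not reproduce (see the cited examples).
def Pre_getChecks (row : Int) (col : Int) (ind : List (List Int)) : Prop :=
  0 ≤ row ∧ row < ind.length ∧ 0 ≤ col ∧ col < ((ind.getD row.toNat []).length : Int) ∧
  ∀ k : Nat, k < ind.length → (k : Int) ≠ row →
    (col < ((ind.getD k []).length : Int) ∧
     (0 ≤ col - |row - (k : Int)| → col - |row - (k : Int)| < ((ind.getD k []).length : Int)) ∧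
     (col + |row - (k : Int)| < ((ind.getD row.toNat []).length : Int) →
       col + |row - (k : Int)| < ((ind.getD k []).length : Int)))
instance (row : Int) (col : Int) (ind : List (List Int)) : Decidable (Pre_getChecks row col ind) := by
  unfold Pre_getChecks; infer_instance

def pvWitness_getChecks : Int × Int × List (List Int) :=
  (1, 1, [[1, 0, 1], [0, 1, 1], [1, 1, 0]])

def Spec_getChecks (row : Int) (col : Int) (ind : List (List Int)) (out : Int) : Prop := out = getChecks_alt row col ind
instance (row : Int) (col : Int) (ind : List (List Int)) (out : Int) : Decidable (Spec_getChecks row col ind out) := by unfold Spec_getChecks; infer_instance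

-- ===== CLAIM (what is proved, stated in full; the proofs are below) =====
def Claim_equal_getChecks : Prop := ∀ (row : Int) (col : Int) (ind : List (List Int)), Dom_getChecks row col ind → Pre_getChecks row col ind → Spec_getChecks row col ind (getChecks row col ind)


-- ===== LEMMAS AND PROOFS =====

-- a counting loop is a sum of 0/1 indicators
lemma pvFoldlCount (l : List Int) (p : Int → Prop) [DecidablePred p] (a : Int) :
    l.foldl (fun cnt k => if p k then cnt + 1 else cnt) a
      = a + (l.map (fun k => if p k then (1 : Int) else 0)).sum := by
  induction l generalizing a with
  | nil => simp
  | cons x xs ih =>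
    simp only [List.foldl_cons, List.map_cons, List.sum_cons]
    rw [ih]
    split_ifs <;> ring

-- a loop whose body adds F r to the accumulator is a sum
lemma pvFoldlBody {α : Type} (l : List α) (f : Int → α → Int) (F : α → Int)
    (h : ∀ cnt r, f cnt r = cnt + F r) (a : Int) :
    l.foldl f a = a + (l.map F).sum := by
  have hf : f = fun cnt r => cnt + F r := funext fun c => funext fun r => h c r
  rw [hf, PySem.List.foldl_add]

-- summing over range n backwards
lemma pvSumReflect (n : Nat) (f : Nat → Int) :
    ((List.range n).map f).sum = ((List.range n).map (fun t => f (n - 1 - t))).sum := by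
  induction n with
  | zero => simp
  | succ n ih =>
    conv_lhs => rw [List.range_succ]
    conv_rhs => rw [List.range_succ_eq_map]
    simp only [List.map_append, List.sum_append, List.map_cons, List.sum_cons,
      List.map_map, List.map_nil, List.sum_nil]
    have h1 : (List.range n).map ((fun t => f (n + 1 - 1 - t)) ∘ Nat.succ)
        = (List.range n).map (fun t => f (n - 1 - t)) := by
      apply List.map_congr_left
      intro t _
      simp only [Function.comp]
      congr 1
      omega
    have h2 : n + 1 - 1 - 0 = n := by omega
    rw [h1, h2, ih]
    ring

-- a guard 'k < c' truncates the range
lemma pvSumTruncate (n c : Nat) (f : Nat → Int) :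
    ((List.range n).map (fun k => if k < c then f k else 0)).sum
      = ((List.range (min n c)).map f).sum := by
  induction n with
  | zero => simp
  | succ n ih =>
    rw [List.range_succ]
    simp only [List.map_append, List.sum_append, List.map_cons, List.sum_cons,
      List.map_nil, List.sum_nil]
    rw [ih]
    by_cases h : n < c
    · have h1 : min (n + 1) c = min n c + 1 := by omega
      have h2 : min n c = n := by omega
      rw [h1, List.range_succ]
      simp [h, h2]
    · have h1 : min (n + 1) c = min n c := by omega
      simp [h, h1]

-- the up-left guarded sum over the rows above is the up-left walk sum
lemma pvPieceUL (ind : List (List Int)) (R C : Nat) :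
    ((PySem.List.pyRange 0 (R : Int) 1).map (fun r =>
        if 0 ≤ (C : Int) - ((R : Int) - r) then
          (if pvCell ind r ((C : Int) - ((R : Int) - r)) = 1 then (1 : Int) else 0)
        else 0)).sum
      = ((List.range (min R C)).map (fun t : Nat =>
          if pvCell ind ((R : Int) - 1 - (t : Int)) ((C : Int) - 1 - (t : Int)) = 1
          then (1 : Int) else 0)).sum := by
  rw [PySem.List.pyRange_zero_natCast, List.map_map, pvSumReflect]
  refine Eq.trans (congrArg List.sum (List.map_congr_left ?_)) (pvSumTruncate R C _)
  intro t ht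
  rw [List.mem_range] at ht
  simp only [Function.comp]
  have e1 : ((R - 1 - t : Nat) : Int) = (R : Int) - 1 - (t : Int) := by omega
  simp only [e1]
  have e2 : (C : Int) - ((R : Int) - ((R : Int) - 1 - (t : Int))) = (C : Int) - 1 - (t : Int) := by ring
  simp only [e2]
  exact if_congr (by omega) rfl rfl

-- the up-right guarded sum over the rows above is the up-right walk sum
lemma pvPieceUR (ind : List (List Int)) (R C M : Nat) :
    ((PySem.List.pyRange 0 (R : Int) 1).map (fun r =>
        if (C : Int) + ((R : Int) - r) < (M : Int) then
          (if pvCell ind r ((C : Int) + ((R : Int) - r)) = 1 then (1 : Int) else 0)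
        else 0)).sum
      = ((List.range (min R (M - C - 1))).map (fun t : Nat =>
          if pvCell ind ((R : Int) - 1 - (t : Int)) ((C : Int) + 1 + (t : Int)) = 1
          then (1 : Int) else 0)).sum := by
  rw [PySem.List.pyRange_zero_natCast, List.map_map, pvSumReflect]
  refine Eq.trans (congrArg List.sum (List.map_congr_left ?_)) (pvSumTruncate R (M - C - 1) _)
  intro t ht
  rw [List.mem_range] at ht
  simp only [Function.comp]
  have e1 : ((R - 1 - t : Nat) : Int) = (R : Int) - 1 - (t : Int) := by omega
  simp only [e1]
  have e2 : (C : Int) + ((R : Int) - ((R : Int) - 1 - (t : Int))) = (C : Int) + 1 + (t : Int) := by ring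
  simp only [e2]
  exact if_congr (by omega) rfl rfl

-- the down-right guarded sum over the rows below is the down-right walk sum
lemma pvPieceDR (ind : List (List Int)) (R C N M : Nat) :
    ((PySem.List.pyRange ((R : Int) + 1) (N : Int) 1).map (fun r =>
        if (C : Int) + (r - (R : Int)) < (M : Int) then
          (if pvCell ind r ((C : Int) + (r - (R : Int))) = 1 then (1 : Int) else 0)
        else 0)).sum
      = ((List.range (min (N - R - 1) (M - C - 1))).map (fun t : Nat =>
          if pvCell ind ((R : Int) + 1 + (t : Int)) ((C : Int) + 1 + (t : Int)) = 1
          then (1 : Int) else 0)).sum := by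
  rw [PySem.List.pyRange_one, List.map_map]
  have hn : ((N : Int) - ((R : Int) + 1)).toNat = N - R - 1 := by omega
  rw [hn]
  have h : (List.range (N - R - 1)).map ((fun r =>
        if (C : Int) + (r - (R : Int)) < (M : Int) then
          (if pvCell ind r ((C : Int) + (r - (R : Int))) = 1 then (1 : Int) else 0)
        else 0) ∘ (fun k : Nat => (R : Int) + 1 + (k : Int)))
      = (List.range (N - R - 1)).map (fun t => if t < M - C - 1 then
          (if pvCell ind ((R : Int) + 1 + (t : Int)) ((C : Int) + 1 + (t : Int)) = 1
           then (1 : Int) else 0) else 0) := by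
    apply List.map_congr_left
    intro t ht
    rw [List.mem_range] at ht
    simp only [Function.comp]
    have e2 : (C : Int) + ((R : Int) + 1 + (t : Int) - (R : Int)) = (C : Int) + 1 + (t : Int) := by ring
    simp only [e2]
    exact if_congr (by omega) rfl rfl
  rw [h, pvSumTruncate]

-- the down-left guarded sum over the rows below is the down-left walk sum
lemma pvPieceDL (ind : List (List Int)) (R C N : Nat) :
    ((PySem.List.pyRange ((R : Int) + 1) (N : Int) 1).map (fun r =>
        if 0 ≤ (C : Int) - (r - (R : Int)) then
          (if pvCell ind r ((C : Int) - (r - (R : Int))) = 1 then (1 : Int) else 0)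
        else 0)).sum
      = ((List.range (min C (N - R - 1))).map (fun t : Nat =>
          if pvCell ind ((R : Int) + 1 + (t : Int)) ((C : Int) - 1 - (t : Int)) = 1
          then (1 : Int) else 0)).sum := by
  rw [PySem.List.pyRange_one, List.map_map]
  have hn : ((N : Int) - ((R : Int) + 1)).toNat = N - R - 1 := by omega
  rw [hn]
  have h : (List.range (N - R - 1)).map ((fun r =>
        if 0 ≤ (C : Int) - (r - (R : Int)) then
          (if pvCell ind r ((C : Int) - (r - (R : Int))) = 1 then (1 : Int) else 0)
        else 0) ∘ (fun k : Nat => (R : Int) + 1 + (k : Int)))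
      = (List.range (N - R - 1)).map (fun t => if t < C then
          (if pvCell ind ((R : Int) + 1 + (t : Int)) ((C : Int) - 1 - (t : Int)) = 1
           then (1 : Int) else 0) else 0) := by
    apply List.map_congr_left
    intro t ht
    rw [List.mem_range] at ht
    simp only [Function.comp]
    have e2 : (C : Int) - ((R : Int) + 1 + (t : Int) - (R : Int)) = (C : Int) - 1 - (t : Int) := by ring
    simp only [e2]
    exact if_congr (by omega) rfl rfl
  rw [h, pvSumTruncate]
  have hmin : min (N - R - 1) C = min C (N - R - 1) := by omega
  rw [hmin]

-- walk characterizations: each while-walk is the sum of the indicators of the cells it visits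
lemma pvWalkUR_eq (ind : List (List Int)) (m i j cnt : Int) :
    pvWalkUR ind m i j cnt =
      cnt + ((List.range (min (i + 1) (m - j)).toNat).map
        (fun t : Nat => if pvCell ind (i - (t : Int)) (j + (t : Int)) = 1 then (1 : Int) else 0)).sum := by
  fun_induction pvWalkUR ind m i j cnt with
  | case1 i j cnt h ih =>
    have hs : (min (i + 1) (m - j)).toNat = (min ((i - 1) + 1) (m - (j + 1))).toNat + 1 := by
      rw [Int.min_def, Int.min_def]; split_ifs <;> omega
    simp only [dite_eq_ite] at ih
    rw [ih, hs, List.range_succ_eq_map]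
    simp only [List.map_cons, List.map_map, List.sum_cons]
    have h2 : ((List.range (min (i - 1 + 1) (m - (j + 1))).toNat).map
        (fun t : Nat => if pvCell ind (i - 1 - (t : Int)) (j + 1 + (t : Int)) = 1 then (1 : Int) else 0)).sum =
        ((List.range (min (i - 1 + 1) (m - (j + 1))).toNat).map
        ((fun t : Nat => if pvCell ind (i - (t : Int)) (j + (t : Int)) = 1 then (1 : Int) else 0) ∘ Nat.succ)).sum := by
      congr 1
      apply List.map_congr_left
      intro t _
      simp only [Function.comp, Nat.succ_eq_add_one]
      push_cast
      ring_nf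
    rw [h2]
    simp only [Nat.cast_zero, sub_zero, add_zero]
    split_ifs <;> ring
  | case2 i j cnt h =>
    have hz : (min (i + 1) (m - j)).toNat = 0 := by
      rw [Int.min_def]; split_ifs <;> omega
    rw [hz]; simp

lemma pvWalkUL_eq (ind : List (List Int)) (i j cnt : Int) :
    pvWalkUL ind i j cnt =
      cnt + ((List.range (min (i + 1) (j + 1)).toNat).map
        (fun t : Nat => if pvCell ind (i - (t : Int)) (j - (t : Int)) = 1 then (1 : Int) else 0)).sum := by
  fun_induction pvWalkUL ind i j cnt with
  | case1 i j cnt h ih =>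
    have hs : (min (i + 1) (j + 1)).toNat = (min ((i - 1) + 1) ((j - 1) + 1)).toNat + 1 := by
      rw [Int.min_def, Int.min_def]; split_ifs <;> omega
    simp only [dite_eq_ite] at ih
    rw [ih, hs, List.range_succ_eq_map]
    simp only [List.map_cons, List.map_map, List.sum_cons]
    have h2 : ((List.range (min (i - 1 + 1) (j - 1 + 1)).toNat).map
        (fun t : Nat => if pvCell ind (i - 1 - (t : Int)) (j - 1 - (t : Int)) = 1 then (1 : Int) else 0)).sum =
        ((List.range (min (i - 1 + 1) (j - 1 + 1)).toNat).map
        ((fun t : Nat => if pvCell ind (i - (t : Int)) (j - (t : Int)) = 1 then (1 : Int) else 0) ∘ Nat.succ)).sum := by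
      congr 1
      apply List.map_congr_left
      intro t _
      simp only [Function.comp, Nat.succ_eq_add_one]
      push_cast
      ring_nf
    rw [h2]
    simp only [Nat.cast_zero, sub_zero]
    split_ifs <;> ring
  | case2 i j cnt h =>
    have hz : (min (i + 1) (j + 1)).toNat = 0 := by
      rw [Int.min_def]; split_ifs <;> omega
    rw [hz]; simp

lemma pvWalkDR_eq (ind : List (List Int)) (n m i j cnt : Int) :
    pvWalkDR ind n m i j cnt =
      cnt + ((List.range (min (n - i) (m - j)).toNat).map
        (fun t : Nat => if pvCell ind (i + (t : Int)) (j + (t : Int)) = 1 then (1 : Int) else 0)).sum := by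
  fun_induction pvWalkDR ind n m i j cnt with
  | case1 i j cnt h ih =>
    have hs : (min (n - i) (m - j)).toNat = (min (n - (i + 1)) (m - (j + 1))).toNat + 1 := by
      rw [Int.min_def, Int.min_def]; split_ifs <;> omega
    simp only [dite_eq_ite] at ih
    rw [ih, hs, List.range_succ_eq_map]
    simp only [List.map_cons, List.map_map, List.sum_cons]
    have h2 : ((List.range (min (n - (i + 1)) (m - (j + 1))).toNat).map
        (fun t : Nat => if pvCell ind (i + 1 + (t : Int)) (j + 1 + (t : Int)) = 1 then (1 : Int) else 0)).sum =
        ((List.range (min (n - (i + 1)) (m - (j + 1))).toNat).map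
        ((fun t : Nat => if pvCell ind (i + (t : Int)) (j + (t : Int)) = 1 then (1 : Int) else 0) ∘ Nat.succ)).sum := by
      congr 1
      apply List.map_congr_left
      intro t _
      simp only [Function.comp, Nat.succ_eq_add_one]
      push_cast
      ring_nf
    rw [h2]
    simp only [Nat.cast_zero, add_zero]
    split_ifs <;> ring
  | case2 i j cnt h =>
    have hz : (min (n - i) (m - j)).toNat = 0 := by
      rw [Int.min_def]; split_ifs <;> omega
    rw [hz]; simp

lemma pvWalkDL_eq (ind : List (List Int)) (n i j cnt : Int) :
    pvWalkDL ind n i j cnt =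
      cnt + ((List.range (min (j + 1) (n - i)).toNat).map
        (fun t : Nat => if pvCell ind (i + (t : Int)) (j - (t : Int)) = 1 then (1 : Int) else 0)).sum := by
  fun_induction pvWalkDL ind n i j cnt with
  | case1 i j cnt h ih =>
    have hs : (min (j + 1) (n - i)).toNat = (min ((j - 1) + 1) (n - (i + 1))).toNat + 1 := by
      rw [Int.min_def, Int.min_def]; split_ifs <;> omega
    simp only [dite_eq_ite] at ih
    rw [ih, hs, List.range_succ_eq_map]
    simp only [List.map_cons, List.map_map, List.sum_cons]
    have h2 : ((List.range (min (j - 1 + 1) (n - (i + 1))).toNat).map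
        (fun t : Nat => if pvCell ind (i + 1 + (t : Int)) (j - 1 - (t : Int)) = 1 then (1 : Int) else 0)).sum =
        ((List.range (min (j - 1 + 1) (n - (i + 1))).toNat).map
        ((fun t : Nat => if pvCell ind (i + (t : Int)) (j - (t : Int)) = 1 then (1 : Int) else 0) ∘ Nat.succ)).sum := by
      congr 1
      apply List.map_congr_left
      intro t _
      simp only [Function.comp, Nat.succ_eq_add_one]
      push_cast
      ring_nf
    rw [h2]
    simp only [Nat.cast_zero, add_zero, sub_zero]
    split_ifs <;> ring
  | case2 i j cnt h =>
    have hz : (min (j + 1) (n - i)).toNat = 0 := by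
      rw [Int.min_def]; split_ifs <;> omega
    rw [hz]; simp

-- the row loop of B, with the absolute value still unresolved
lemma pvBodyB (ind : List (List Int)) (R C M : Nat) :
    ∀ (cnt r : Int),
      (if r = (R : Int) then cnt
       else List.foldl (fun cnt c => if 0 ≤ c ∧ c < (M : Int) ∧ pvCell ind r c = 1 then cnt + 1 else cnt)
         cnt [(C : Int), (C : Int) - |(R : Int) - r|, (C : Int) + |(R : Int) - r|])
      = cnt + (if r = (R : Int) then 0 else
          ((if 0 ≤ (C : Int) ∧ (C : Int) < (M : Int) ∧ pvCell ind r (C : Int) = 1 then (1 : Int) else 0) +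
           ((if 0 ≤ (C : Int) - |(R : Int) - r| ∧ (C : Int) - |(R : Int) - r| < (M : Int) ∧
               pvCell ind r ((C : Int) - |(R : Int) - r|) = 1 then (1 : Int) else 0) +
            (if 0 ≤ (C : Int) + |(R : Int) - r| ∧ (C : Int) + |(R : Int) - r| < (M : Int) ∧
               pvCell ind r ((C : Int) + |(R : Int) - r|) = 1 then (1 : Int) else 0)))) := by
  intro cnt r
  by_cases hr : r = (R : Int)
  · simp [hr]
  · rw [if_neg hr, if_neg hr]
    simp only [List.foldl_cons, List.foldl_nil]
    split_ifs <;> ring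

-- ===== VERDICT (by name: the statement is the Claim_ definition above) =====
theorem getChecks_spec : Claim_equal_getChecks := by
  intro row col ind _ hpre
  obtain ⟨hr0, hrn, hc0, hcm, -⟩ := hpre
  obtain ⟨R, rfl⟩ : ∃ R : Nat, row = (R : Int) := ⟨row.toNat, by omega⟩
  obtain ⟨C, rfl⟩ : ∃ C : Nat, col = (C : Int) := ⟨col.toNat, by omega⟩
  simp only [Int.toNat_natCast] at hcm
  unfold Spec_getChecks
  have hgd : PySem.List.pyGetD ind (R : Int) ([] : List Int) = ind.getD R [] := by
    rw [PySem.List.pyGetD_of_nonneg ind ([] : List Int) (by omega)]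
    simp
  simp only [getChecks, getChecks_alt]
  rw [hgd]
  set N := ind.length with hN
  set M := (ind.getD R ([] : List Int)).length with hM
  have hRN : R < N := by omega
  have hCM : C < M := by omega
  clear hrn hcm
  -- A: the four counting loops become indicator sums
  rw [pvFoldlCount, pvFoldlCount, pvFoldlCount, pvFoldlCount]
  -- A: the four while-walks become indicator sums
  rw [pvWalkUR_eq, pvWalkUL_eq, pvWalkDR_eq, pvWalkDL_eq]
  have sUR : (min ((R : Int) - 1 + 1) ((M : Int) - ((C : Int) + 1))).toNat = min R (M - C - 1) := by omega
  have sUL : (min ((R : Int) - 1 + 1) ((C : Int) - 1 + 1)).toNat = min R C := by omega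
  have sDR : (min ((N : Int) - ((R : Int) + 1)) ((M : Int) - ((C : Int) + 1))).toNat
      = min (N - R - 1) (M - C - 1) := by omega
  have sDL : (min ((C : Int) - 1 + 1) ((N : Int) - ((R : Int) + 1))).toNat = min C (N - R - 1) := by omega
  rw [sUR, sUL, sDR, sDL]
  -- B: the row loop becomes a sum over the rows
  rw [pvFoldlBody (PySem.List.pyRange 0 (N : Int) 1)
    (f := fun cnt r =>
      if r = (R : Int) then cnt
      else List.foldl (fun cnt c => if 0 ≤ c ∧ c < (M : Int) ∧ pvCell ind r c = 1 then cnt + 1 else cnt)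
        cnt [(C : Int), (C : Int) - |(R : Int) - r|, (C : Int) + |(R : Int) - r|])
    _ (pvBodyB ind R C M)]
  -- split the rows at R
  have hsplitN : PySem.List.pyRange 0 (N : Int) 1
      = PySem.List.pyRange 0 (R : Int) 1 ++ (R : Int) :: PySem.List.pyRange ((R : Int) + 1) (N : Int) 1 := by
    rw [PySem.List.pyRange_one_append 0 (R : Int) (N : Int) (by omega) (by omega)]
    congr 1
    exact PySem.List.pyRange_one_cons (by omega)
  rw [hsplitN, List.map_append, List.sum_append, List.map_cons, List.sum_cons]
  rw [if_pos rfl]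
  -- rows above R: resolve the absolute value and the redundant bounds
  have hup : (PySem.List.pyRange 0 (R : Int) 1).map (fun r =>
        if r = (R : Int) then 0 else
          ((if 0 ≤ (C : Int) ∧ (C : Int) < (M : Int) ∧ pvCell ind r (C : Int) = 1 then (1 : Int) else 0) +
           ((if 0 ≤ (C : Int) - |(R : Int) - r| ∧ (C : Int) - |(R : Int) - r| < (M : Int) ∧
               pvCell ind r ((C : Int) - |(R : Int) - r|) = 1 then (1 : Int) else 0) +
            (if 0 ≤ (C : Int) + |(R : Int) - r| ∧ (C : Int) + |(R : Int) - r| < (M : Int) ∧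
               pvCell ind r ((C : Int) + |(R : Int) - r|) = 1 then (1 : Int) else 0))))
      = (PySem.List.pyRange 0 (R : Int) 1).map (fun r =>
          (if pvCell ind r (C : Int) = 1 then (1 : Int) else 0) +
          ((if 0 ≤ (C : Int) - ((R : Int) - r) then
              (if pvCell ind r ((C : Int) - ((R : Int) - r)) = 1 then (1 : Int) else 0) else 0) +
           (if (C : Int) + ((R : Int) - r) < (M : Int) then
              (if pvCell ind r ((C : Int) + ((R : Int) - r)) = 1 then (1 : Int) else 0) else 0))) := by
    apply List.map_congr_left
    intro r hr
    rw [PySem.List.mem_pyRange_one] at hr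
    have habs : |(R : Int) - r| = (R : Int) - r := abs_of_nonneg (by omega)
    rw [if_neg (by omega : ¬ r = (R : Int)), habs]
    have hb1 : (0 : Int) ≤ (C : Int) := by omega
    have hb2 : ((C : Int)) < (M : Int) := by omega
    have hb3 : (C : Int) - ((R : Int) - r) < (M : Int) := by omega
    have hb4 : (0 : Int) ≤ (C : Int) + ((R : Int) - r) := by omega
    have g1 : (if 0 ≤ (C : Int) ∧ (C : Int) < (M : Int) ∧ pvCell ind r (C : Int) = 1 then (1 : Int) else 0)
        = (if pvCell ind r (C : Int) = 1 then (1 : Int) else 0) := by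
      split_ifs <;> first | rfl | tauto
    have g2 : (if 0 ≤ (C : Int) - ((R : Int) - r) ∧ (C : Int) - ((R : Int) - r) < (M : Int) ∧
          pvCell ind r ((C : Int) - ((R : Int) - r)) = 1 then (1 : Int) else 0)
        = (if 0 ≤ (C : Int) - ((R : Int) - r) then
            (if pvCell ind r ((C : Int) - ((R : Int) - r)) = 1 then (1 : Int) else 0) else 0) := by
      split_ifs <;> first | rfl | tauto
    have g3 : (if 0 ≤ (C : Int) + ((R : Int) - r) ∧ (C : Int) + ((R : Int) - r) < (M : Int) ∧
          pvCell ind r ((C : Int) + ((R : Int) - r)) = 1 then (1 : Int) else 0)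
        = (if (C : Int) + ((R : Int) - r) < (M : Int) then
            (if pvCell ind r ((C : Int) + ((R : Int) - r)) = 1 then (1 : Int) else 0) else 0) := by
      split_ifs <;> first | rfl | tauto
    rw [g1, g2, g3]
  -- rows below R likewise
  have hdown : (PySem.List.pyRange ((R : Int) + 1) (N : Int) 1).map (fun r =>
        if r = (R : Int) then 0 else
          ((if 0 ≤ (C : Int) ∧ (C : Int) < (M : Int) ∧ pvCell ind r (C : Int) = 1 then (1 : Int) else 0) +
           ((if 0 ≤ (C : Int) - |(R : Int) - r| ∧ (C : Int) - |(R : Int) - r| < (M : Int) ∧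
               pvCell ind r ((C : Int) - |(R : Int) - r|) = 1 then (1 : Int) else 0) +
            (if 0 ≤ (C : Int) + |(R : Int) - r| ∧ (C : Int) + |(R : Int) - r| < (M : Int) ∧
               pvCell ind r ((C : Int) + |(R : Int) - r|) = 1 then (1 : Int) else 0))))
      = (PySem.List.pyRange ((R : Int) + 1) (N : Int) 1).map (fun r =>
          (if pvCell ind r (C : Int) = 1 then (1 : Int) else 0) +
          ((if 0 ≤ (C : Int) - (r - (R : Int)) then
              (if pvCell ind r ((C : Int) - (r - (R : Int))) = 1 then (1 : Int) else 0) else 0) +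
           (if (C : Int) + (r - (R : Int)) < (M : Int) then
              (if pvCell ind r ((C : Int) + (r - (R : Int))) = 1 then (1 : Int) else 0) else 0))) := by
    apply List.map_congr_left
    intro r hr
    rw [PySem.List.mem_pyRange_one] at hr
    have habs : |(R : Int) - r| = r - (R : Int) := by
      rw [abs_of_nonpos (by omega), neg_sub]
    rw [if_neg (by omega : ¬ r = (R : Int)), habs]
    have hb1 : (0 : Int) ≤ (C : Int) := by omega
    have hb2 : ((C : Int)) < (M : Int) := by omega
    have hb3 : (C : Int) - (r - (R : Int)) < (M : Int) := by omega
    have hb4 : (0 : Int) ≤ (C : Int) + (r - (R : Int)) := by omega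
    have g1 : (if 0 ≤ (C : Int) ∧ (C : Int) < (M : Int) ∧ pvCell ind r (C : Int) = 1 then (1 : Int) else 0)
        = (if pvCell ind r (C : Int) = 1 then (1 : Int) else 0) := by
      split_ifs <;> first | rfl | tauto
    have g2 : (if 0 ≤ (C : Int) - (r - (R : Int)) ∧ (C : Int) - (r - (R : Int)) < (M : Int) ∧
          pvCell ind r ((C : Int) - (r - (R : Int))) = 1 then (1 : Int) else 0)
        = (if 0 ≤ (C : Int) - (r - (R : Int)) then
            (if pvCell ind r ((C : Int) - (r - (R : Int))) = 1 then (1 : Int) else 0) else 0) := by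
      split_ifs <;> first | rfl | tauto
    have g3 : (if 0 ≤ (C : Int) + (r - (R : Int)) ∧ (C : Int) + (r - (R : Int)) < (M : Int) ∧
          pvCell ind r ((C : Int) + (r - (R : Int))) = 1 then (1 : Int) else 0)
        = (if (C : Int) + (r - (R : Int)) < (M : Int) then
            (if pvCell ind r ((C : Int) + (r - (R : Int))) = 1 then (1 : Int) else 0) else 0) := by
      split_ifs <;> first | rfl | tauto
    rw [g1, g2, g3]
  rw [hup, hdown, PySem.List.sum_map_add_int, PySem.List.sum_map_add_int,
    PySem.List.sum_map_add_int, PySem.List.sum_map_add_int]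
  rw [pvPieceUL ind R C, pvPieceUR ind R C M, pvPieceDL ind R C N, pvPieceDR ind R C N M]
  -- B: the row-line count is the left and the right pass plus the centre cell
  have hsplitM : PySem.List.pyRange 0 (M : Int) 1
      = PySem.List.pyRange 0 (C : Int) 1 ++ (C : Int) :: PySem.List.pyRange ((C : Int) + 1) (M : Int) 1 := by
    rw [PySem.List.pyRange_one_append 0 (C : Int) (M : Int) (by omega) (by omega)]
    congr 1
    exact PySem.List.pyRange_one_cons (by omega)
  have hmap : (PySem.List.pyRange 0 (M : Int) 1).map (fun c => pvCell ind (R : Int) c)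
      = ind.getD R ([] : List Int) := by
    simp only [pvCell, hgd]
    exact PySem.List.map_pyGetD_pyRange_zero' (ind.getD R ([] : List Int)) 0
  have hcount : ((PySem.List.count (ind.getD R ([] : List Int)) 1 : Nat) : Int)
      - (if pvCell ind (R : Int) (C : Int) = 1 then (1 : Int) else 0)
      = ((PySem.List.pyRange 0 (C : Int) 1).map
          (fun k => if pvCell ind (R : Int) k = 1 then (1 : Int) else 0)).sum
        + ((PySem.List.pyRange ((C : Int) + 1) (M : Int) 1).map
          (fun k => if pvCell ind (R : Int) k = 1 then (1 : Int) else 0)).sum := by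
    have h1 : ((PySem.List.count (ind.getD R ([] : List Int)) 1 : Nat) : Int)
        = ((PySem.List.pyRange 0 (M : Int) 1).map
            (fun c => if pvCell ind (R : Int) c = 1 then (1 : Int) else 0)).sum := by
      rw [show (fun c => if pvCell ind (R : Int) c = 1 then (1 : Int) else 0)
          = ((fun x : Int => if x = 1 then (1 : Int) else 0) ∘ (fun c => pvCell ind (R : Int) c)) from rfl]
      rw [← List.map_map, hmap]
      have hfn : (fun x : Int => if x = 1 then (1 : Int) else 0)
          = (fun x : Int => if (x == 1) = true then (1 : Int) else 0) := by
        funext x; simp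
      rw [hfn, PySem.List.sum_map_ite_one_zero, PySem.List.count_eq]
      congr 1
    rw [h1, hsplitM, List.map_append, List.sum_append, List.map_cons, List.sum_cons]
    ring
  rw [hcount]
  ring
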